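-- pv_equiv track=rewrite | github.com/DancingOnAir/LeetcodePythonSolution | string/1830_minimum_number_of_operations_to_make_string_sorted.py | makeStringSorted1
-- ===== SOURCE A (Python) =====
-- def makeStringSorted1(s: str) -> int:
--     cnt, tot, res, combination_tot = [0] * 26, 0, 0, 1
--     for c in s[::-1]:
--         idx = ord(c) - 97
--         cnt[idx] += 1
--         tot += 1
--
--         # eg. 'cdbea' for i == 0, choose 'a' or 'b' is less than 'c', so permutation num is 2 * 4!
--         # we can derive that
--         # for i, permutation num = sum(cnt[:idx]) * (tot - 1)! / cnt[0]! * cnt[1]! * ... * cnt[25]!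
--         # equals (sum(cnt[:idx]) / tot) * (tot! / cnt[0]! * cnt[1]! * ... * cnt[25]!)
--         combination_tot = combination_tot * tot // cnt[idx]
--         res += combination_tot * sum(cnt[:idx]) // tot
--     return res % (10 ** 9 + 7)
-- ===== SOURCE B (Python) =====
-- def makeStringSorted1(s: str) -> int:
--     n = len(s)
--     cnt = [0] * 26
--     for c in s:
--         cnt[ord(c) - 97] += 1
--     fact = [1] * (n + 1)
--     for i in range(1, n + 1):
--         fact[i] = fact[i - 1] * i
--     denom = 1
--     for k in cnt:
--         denom *= fact[k]
--     res = 0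
--     m = n
--     for c in s:
--         idx = ord(c) - 97
--         res += sum(cnt[:idx]) * fact[m - 1] // denom
--         denom //= cnt[idx]
--         cnt[idx] -= 1
--         m -= 1
--     return res % (10 ** 9 + 7)
-- ===== Notes on version B (the rewrite author's own statement) =====
-- stated objective: alternative
-- what changed: B first counts all characters and precomputes a factorial table and the full denominator prod(cnt[j]!), then scans left-to-right computing each rank term directly as sum(cnt[:idx]) * fact[m-1] // denom while dividing the denominator down and decrementing counts, instead of A's right-to-left pass that builds counts up and maintains the multinomial itself through chained exact floor-divisions.
import Mathlib
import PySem

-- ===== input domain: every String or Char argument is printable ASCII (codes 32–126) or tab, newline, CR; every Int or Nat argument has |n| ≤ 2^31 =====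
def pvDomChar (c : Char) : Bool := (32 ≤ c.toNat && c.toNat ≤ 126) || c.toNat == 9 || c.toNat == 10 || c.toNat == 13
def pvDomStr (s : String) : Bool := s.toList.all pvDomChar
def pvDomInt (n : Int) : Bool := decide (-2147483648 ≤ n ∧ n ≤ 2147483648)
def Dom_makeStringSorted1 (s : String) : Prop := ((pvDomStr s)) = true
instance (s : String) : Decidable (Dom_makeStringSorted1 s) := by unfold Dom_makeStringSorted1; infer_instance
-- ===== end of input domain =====

set_option maxHeartbeats 1000000


-- B replaces A's incremental bigint multinomial (right-to-left, two chained exact floor-divisions per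
-- step) by a left-to-right rank scan over precomputed counts and a factorial table, computing each
-- term directly as smaller * (m-1)! // prod(fact[cnt[j]]) — a different traversal and state (alternative).

-- ===== PORT A =====
-- loop body of A (one iteration of 'for c in s[::-1]'); state = (cnt, tot, res, combination_tot)
def pvStepA (st : List Int × Int × Int × Int) (c : Char) : List Int × Int × Int × Int :=
  let cnt := st.1
  let tot := st.2.1
  let res := st.2.2.1
  let comb := st.2.2.2
  let idx : Int := (c.toNat : Int) - 97
  let cnt := PySem.List.pySetD cnt idx (PySem.List.pyGetD cnt idx 0 + 1)
  let tot := tot + 1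
  let comb := PySem.Int.floordiv (comb * tot) (PySem.List.pyGetD cnt idx 0)
  let res := res + PySem.Int.floordiv (comb * (PySem.List.slice cnt none (some idx)).sum) tot
  (cnt, tot, res, comb)

def makeStringSorted1 (s : String) : Int :=
  -- 'for c in s[::-1]' : s[::-1] is the reverse of s (PySem.Str.slice?_none_none_neg_one)
  let st := s.toList.reverse.foldl pvStepA (List.replicate 26 (0:Int), 0, 0, 1)
  PySem.Int.mod st.2.2.1 (10 ^ 9 + 7)

-- ===== PORT B =====
-- 'cnt[ord(c) - 97] += 1' of B's counting pass
def pvCountStep (cnt : List Int) (c : Char) : List Int :=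
  let idx : Int := (c.toNat : Int) - 97
  PySem.List.pySetD cnt idx (PySem.List.pyGetD cnt idx 0 + 1)

-- 'fact[i] = fact[i - 1] * i' of B's factorial-table pass
def pvFactStep (f : List Int) (i : Int) : List Int :=
  PySem.List.pySetD f i (PySem.List.pyGetD f (i - 1) 0 * i)

-- loop body of B's main left-to-right scan; state = (cnt, denom, res, m)
def pvStepB (fact : List Int) (st : List Int × Int × Int × Int) (c : Char) : List Int × Int × Int × Int :=
  let cnt := st.1
  let denom := st.2.1
  let res := st.2.2.1
  let m := st.2.2.2
  let idx : Int := (c.toNat : Int) - 97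
  let res := res + PySem.Int.floordiv
    ((PySem.List.slice cnt none (some idx)).sum * PySem.List.pyGetD fact (m - 1) 0) denom
  let denom := PySem.Int.floordiv denom (PySem.List.pyGetD cnt idx 0)
  let cnt := PySem.List.pySetD cnt idx (PySem.List.pyGetD cnt idx 0 - 1)
  (cnt, denom, res, m - 1)

def makeStringSorted1_alt (s : String) : Int :=
  let n := s.toList.length          -- n = len(s) (PySem.Str.len_eq)
  let cnt0 : List Int := s.toList.foldl pvCountStep (List.replicate 26 (0:Int))
  let fact : List Int := (PySem.List.pyRange 1 ((n:Int)+1) 1).foldl pvFactStep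
    (List.replicate (n+1) (1:Int))
  let denom0 : Int := cnt0.foldl (fun d k => d * PySem.List.pyGetD fact k 0) 1
  let st := s.toList.foldl (pvStepB fact) (cnt0, denom0, 0, (n:Int))
  PySem.Int.mod st.2.2.1 (10 ^ 9 + 7)

-- ===== PRECONDITION & SPEC =====
-- Pre_ admits exactly the strings on which A returns: every character has code 71..122
-- ('G'..'z'); on any other character A raises IndexError on cnt[ord(c) - 97] (and B does too).
def Pre_makeStringSorted1 (s : String) : Prop :=
  (s.toList.all (fun c => 71 ≤ c.toNat && c.toNat ≤ 122)) = true
instance (s : String) : Decidable (Pre_makeStringSorted1 s) := by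
  unfold Pre_makeStringSorted1; infer_instance
def pvWitness_makeStringSorted1 : String := "ba"

def Spec_makeStringSorted1 (s : String) (out : Int) : Prop := out = makeStringSorted1_alt s
instance (s : String) (out : Int) : Decidable (Spec_makeStringSorted1 s out) := by unfold Spec_makeStringSorted1; infer_instance

-- ===== CLAIM (what is proved, stated in full; the proofs are below) =====
def Claim_equal_makeStringSorted1 : Prop := ∀ (s : String), Dom_makeStringSorted1 s → Pre_makeStringSorted1 s → Spec_makeStringSorted1 s (makeStringSorted1 s)

-- ===== LEMMAS AND PROOFS =====

-- abstract (exact-arithmetic) model shared by both proofs, over the list of effective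
-- letter indices: Python's cnt[ord(c)-97] touches position (ord(c)-97) mod 26
def effC (c : Char) : ℕ := if 97 ≤ c.toNat then c.toNat - 97 else c.toNat - 71
def cntL (l : List ℕ) : List Int := (List.range 26).map (fun j => ((l.count j : ℕ) : Int))
def InR (c : Char) : Prop := 71 ≤ c.toNat ∧ c.toNat ≤ 122
def effDfac (l : List ℕ) : ℕ := ∏ j ∈ Finset.range 26, (l.count j).factorial
def effLess (e : ℕ) (l : List ℕ) : ℕ := ∑ j ∈ Finset.range e, l.count j
def effTerm (e : ℕ) (l : List ℕ) : ℕ := effLess e l * (l.length - 1).factorial / effDfac l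
def effComb (l : List ℕ) : ℕ := l.length.factorial / effDfac l
def effSum : List ℕ → ℕ
  | [] => 0
  | e :: t => effTerm e (e :: t) + effSum t

theorem sum_count_eq (l : List ℕ) (hl : ∀ x ∈ l, x < 26) :
    ∑ j ∈ Finset.range 26, l.count j = l.length := by
  induction l with
  | nil => simp
  | cons a t ih =>
    have ha : a < 26 := hl a (by simp)
    have ht : ∀ x ∈ t, x < 26 := fun x hx => hl x (by simp [hx])
    simp only [List.count_cons, List.length_cons]
    rw [Finset.sum_add_distrib, ih ht]
    have h1 : ∑ j ∈ Finset.range 26, (if (a == j) = true then 1 else 0) = 1 := by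
      rw [Finset.sum_eq_single a] <;> simp_all <;> omega
    rw [h1]

theorem Dfac_cons (e : ℕ) (t : List ℕ) (he : e < 26) :
    effDfac (e :: t) = (t.count e + 1) * effDfac t := by
  unfold effDfac
  have hmem : e ∈ Finset.range 26 := Finset.mem_range.mpr he
  have h1 : ∀ j, ((e :: t).count j).factorial
      = Function.update (fun j => (t.count j).factorial) e ((t.count e + 1).factorial) j := by
    intro j
    by_cases hj : j = e
    · subst hj; simp [Function.update_self]
    · simp [List.count_cons, Ne.symm hj, Function.update_of_ne hj]
  calc ∏ j ∈ Finset.range 26, ((e :: t).count j).factorial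
      = ∏ j ∈ Finset.range 26, Function.update (fun j => (t.count j).factorial) e ((t.count e + 1).factorial) j :=
        Finset.prod_congr rfl (fun j _ => h1 j)
    _ = (t.count e + 1).factorial * ∏ j ∈ (Finset.range 26) \ {e}, (t.count j).factorial := by
        rw [Finset.prod_update_of_mem hmem]
    _ = (t.count e + 1) * effDfac t := by
        rw [Nat.factorial_succ, mul_assoc]
        unfold effDfac
        rw [Finset.sdiff_singleton_eq_erase,
            Finset.mul_prod_erase (Finset.range 26) (fun j => (t.count j).factorial) hmem]

theorem Dfac_dvd (l : List ℕ) (hl : ∀ x ∈ l, x < 26) :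
    effDfac l ∣ l.length.factorial := by
  have := Nat.prod_factorial_dvd_factorial_sum (Finset.range 26) (fun j => l.count j)
  rwa [sum_count_eq l hl] at this

-- A's combination_tot update is exact
theorem comb_step (e : ℕ) (t : List ℕ) (he : e < 26) (ht : ∀ x ∈ t, x < 26) :
    effComb t * (t.length + 1) / (t.count e + 1) = effComb (e :: t) := by
  unfold effComb
  rw [Dfac_cons e t he, List.length_cons]
  have hD := Dfac_dvd t ht
  calc t.length.factorial / effDfac t * (t.length + 1) / (t.count e + 1)
      = (t.length + 1) * t.length.factorial / effDfac t / (t.count e + 1) := by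
        rw [Nat.mul_div_assoc _ hD, mul_comm]
    _ = (t.length + 1).factorial / (effDfac t * (t.count e + 1)) := by
        rw [Nat.div_div_eq_div_mul, Nat.factorial_succ]
    _ = (t.length + 1).factorial / ((t.count e + 1) * effDfac t) := by rw [mul_comm (effDfac t)]

-- A's res update equals the direct per-suffix term B computes
theorem res_step (e : ℕ) (t : List ℕ) (he : e < 26) (ht : ∀ x ∈ t, x < 26) :
    effComb (e :: t) * effLess e (e :: t) / (t.length + 1) = effTerm e (e :: t) := by
  have hG : ∀ x ∈ (e :: t), x < 26 := by
    intro x hx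
    rcases List.mem_cons.mp hx with h | h
    · omega
    · exact ht x h
  have hD := Dfac_dvd (e :: t) hG
  simp only [List.length_cons] at hD
  unfold effComb effTerm
  simp only [List.length_cons, Nat.add_sub_cancel]
  calc (t.length + 1).factorial / effDfac (e :: t) * effLess e (e :: t) / (t.length + 1)
      = effLess e (e :: t) * (t.length + 1).factorial / effDfac (e :: t) / (t.length + 1) := by
        rw [Nat.mul_div_assoc _ hD, mul_comm]
    _ = (t.length + 1) * (effLess e (e :: t) * t.length.factorial) / ((t.length + 1) * effDfac (e :: t)) := by
        rw [Nat.div_div_eq_div_mul, Nat.factorial_succ]; ring_nf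
    _ = effLess e (e :: t) * t.length.factorial / effDfac (e :: t) :=
        Nat.mul_div_mul_left _ _ (Nat.succ_pos _)

theorem effC_lt (c : Char) (h : InR c) : effC c < 26 := by
  unfold effC; rcases h with ⟨h1, h2⟩; split <;> omega

theorem length_cntL (l : List ℕ) : (cntL l).length = 26 := by simp [cntL]

theorem getElem_cntL (l : List ℕ) (e : ℕ) (he : e < 26) :
    (cntL l)[e]'(by rw [length_cntL]; exact he) = (l.count e : Int) := by
  simp [cntL]

theorem pyGetD_idx (xs : List Int) (hlen : xs.length = 26) (c : Char) (h : InR c) :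
    PySem.List.pyGetD xs ((c.toNat : Int) - 97) 0 = xs[effC c]'(by rw [hlen]; exact effC_lt c h) := by
  rcases h with ⟨h1, h2⟩
  by_cases hc : 97 ≤ c.toNat
  · have he : ((c.toNat : Int) - 97) = ((c.toNat - 97 : ℕ) : Int) := by omega
    rw [he, PySem.List.pyGetD_natCast]
    have hlt : c.toNat - 97 < xs.length := by omega
    rw [List.getD_eq_getElem _ _ hlt]
    congr 1
    unfold effC; split <;> omega
  · have he : ((c.toNat : Int) - 97) = -((97 - c.toNat : ℕ) : Int) := by omega
    rw [he, PySem.List.pyGetD_neg_natCast xs (97 - c.toNat) 0 (by omega) (by omega)]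
    congr 1
    unfold effC; split <;> omega

theorem pySetD_idx (xs : List Int) (hlen : xs.length = 26) (c : Char) (h : InR c) (v : Int) :
    PySem.List.pySetD xs ((c.toNat : Int) - 97) v = xs.set (effC c) v := by
  rcases h with ⟨h1, h2⟩
  unfold PySem.List.pySetD PySem.List.pySet? PySem.List.pyIdx?
  by_cases hc : 97 ≤ c.toNat
  · have h0 : (0:Int) ≤ (c.toNat : Int) - 97 := by omega
    have hlt : (c.toNat : Int) - 97 < (xs.length : Int) := by omega
    simp only [h0, hlt, if_pos, if_true]
    simp only [Option.map_some, Option.getD_some]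
    congr 1
    unfold effC; split <;> omega
  · have h0 : ¬ (0:Int) ≤ (c.toNat : Int) - 97 := by omega
    have hge : -(xs.length : Int) ≤ (c.toNat : Int) - 97 := by omega
    simp only [h0, if_false, hge, if_pos, if_true]
    simp only [Option.map_some, Option.getD_some]
    congr 1
    unfold effC; split <;> omega

theorem slice_idx (xs : List Int) (hlen : xs.length = 26) (c : Char) (h : InR c) :
    PySem.List.slice xs none (some ((c.toNat : Int) - 97)) = xs.take (effC c) := by
  rcases h with ⟨h1, h2⟩
  by_cases hc : 97 ≤ c.toNat
  · have he : ((c.toNat : Int) - 97) = ((c.toNat - 97 : ℕ) : Int) := by omega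
    rw [he, PySem.List.slice_to_natCast]
    congr 1
    unfold effC; split <;> omega
  · have he : ((c.toNat : Int) - 97) = -((97 - c.toNat : ℕ) : Int) := by omega
    rw [he, PySem.List.slice_to_neg_natCast xs (97 - c.toNat) (by omega)]
    congr 1
    unfold effC; split <;> omega

theorem set_inc_cntL (l : List ℕ) (e : ℕ) (he : e < 26) :
    (cntL l).set e ((l.count e : Int) + 1) = cntL (e :: l) := by
  apply List.ext_getElem
  · simp [cntL]
  · intro i h1 h2
    have hi : i < 26 := by simpa [length_cntL] using h2
    by_cases hie : i = e
    · subst hie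
      rw [List.getElem_set_self (by simp [List.length_set, length_cntL]; omega)]
      simp [cntL, List.count_cons]
    · rw [List.getElem_set_ne (by omega)]
      simp [cntL, List.count_cons, Ne.symm hie]

theorem set_dec_cntL (u : List ℕ) (e : ℕ) (he : e < 26) :
    (cntL (e :: u)).set e ((u.count e : Int)) = cntL u := by
  apply List.ext_getElem
  · simp [cntL]
  · intro i h1 h2
    have hi : i < 26 := by simpa [length_cntL] using h2
    by_cases hie : i = e
    · subst hie
      rw [List.getElem_set_self (by simp [List.length_set, length_cntL]; omega)]
      simp [cntL]
    · rw [List.getElem_set_ne (by omega)]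
      simp [cntL, List.count_cons, Ne.symm hie]

theorem sum_take_cntL (l : List ℕ) (e : ℕ) (he : e ≤ 26) :
    ((cntL l).take e).sum = (effLess e l : Int) := by
  unfold cntL effLess
  rw [← List.map_take, List.take_range, Nat.min_eq_left he]
  push_cast
  induction e with
  | zero => simp
  | succ k ih =>
    rw [List.range_succ, Finset.sum_range_succ, List.map_append, List.sum_append, ih (by omega)]
    simp

theorem cntL_append_singleton (l : List ℕ) (e : ℕ) : cntL (l ++ [e]) = cntL (e :: l) := by
  unfold cntL
  apply List.map_congr_left
  intro j _
  simp [List.count_append, List.count_cons]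

-- count/length congruences: the abstract quantities only depend on counts and length
theorem effLess_congr (e : ℕ) (l1 l2 : List ℕ) (hc : ∀ j, l1.count j = l2.count j) :
    effLess e l1 = effLess e l2 := by
  unfold effLess; exact Finset.sum_congr rfl (fun j _ => hc j)

theorem effDfac_congr (l1 l2 : List ℕ) (hc : ∀ j, l1.count j = l2.count j) :
    effDfac l1 = effDfac l2 := by
  unfold effDfac; exact Finset.prod_congr rfl (fun j _ => by rw [hc j])

theorem effTerm_congr (e : ℕ) (l1 l2 : List ℕ) (hl : l1.length = l2.length)
    (hc : ∀ j, l1.count j = l2.count j) : effTerm e l1 = effTerm e l2 := by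
  unfold effTerm; rw [effLess_congr e l1 l2 hc, effDfac_congr l1 l2 hc, hl]

theorem effComb_congr (l1 l2 : List ℕ) (hl : l1.length = l2.length)
    (hc : ∀ j, l1.count j = l2.count j) : effComb l1 = effComb l2 := by
  unfold effComb; rw [effDfac_congr l1 l2 hc, hl]

theorem cntL_nil : cntL [] = List.replicate 26 (0:Int) := by
  unfold cntL
  apply List.ext_getElem <;> simp

theorem cntL_middle (q X : List ℕ) (e : ℕ) : cntL (q ++ e :: X) = cntL (e :: (q ++ X)) := by
  unfold cntL
  apply List.map_congr_left
  intro j _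
  simp [List.count_append, List.count_cons]
  omega

-- evaluating one iteration of A's loop body on the abstract state
theorem stepA_eval (c : Char) (h : InR c) (q : List ℕ) (hq : ∀ x ∈ q, x < 26) :
    pvStepA (cntL q, (q.length : Int), ((effSum q.reverse : ℕ) : Int), ((effComb q : ℕ) : Int)) c
      = (cntL (effC c :: q), ((q.length + 1 : ℕ) : Int),
         ((effSum (effC c :: q.reverse) : ℕ) : Int), ((effComb (effC c :: q) : ℕ) : Int)) := by
  have he : effC c < 26 := effC_lt c h
  unfold pvStepA
  simp only
  rw [pyGetD_idx _ (length_cntL q) c h, getElem_cntL q _ he,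
      pySetD_idx _ (length_cntL q) c h, set_inc_cntL q _ he,
      pyGetD_idx _ (length_cntL _) c h, getElem_cntL _ _ he,
      slice_idx _ (length_cntL _) c h, sum_take_cntL _ _ (le_of_lt he)]
  have hcnt : ((effC c :: q).count (effC c) : Int) = ((q.count (effC c) + 1 : ℕ) : Int) := by
    simp [List.count_cons]
  have hcomb : PySem.Int.floordiv (((effComb q : ℕ) : Int) * ((q.length : Int) + 1))
      (((effC c :: q).count (effC c) : Int)) = ((effComb (effC c :: q) : ℕ) : Int) := by
    rw [hcnt]
    have h1 : ((effComb q : ℕ) : Int) * ((q.length : Int) + 1) = ((effComb q * (q.length + 1) : ℕ) : Int) := by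
      push_cast; ring
    rw [h1, PySem.Int.floordiv_natCast, comb_step _ q he hq]
  rw [hcomb]
  have hterm : PySem.Int.floordiv (((effComb (effC c :: q) : ℕ) : Int) * ((effLess (effC c) (effC c :: q) : ℕ) : Int))
      ((q.length : Int) + 1) = ((effTerm (effC c) (effC c :: q) : ℕ) : Int) := by
    have h1 : ((effComb (effC c :: q) : ℕ) : Int) * ((effLess (effC c) (effC c :: q) : ℕ) : Int)
        = ((effComb (effC c :: q) * effLess (effC c) (effC c :: q) : ℕ) : Int) := by push_cast; ring
    have h2 : ((q.length : Int) + 1) = ((q.length + 1 : ℕ) : Int) := by push_cast; ring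
    rw [h1, h2, PySem.Int.floordiv_natCast, res_step _ q he hq]
  rw [hterm]
  simp only [Prod.mk.injEq]
  refine ⟨trivial, by push_cast; ring, ?_, trivial⟩
  have hsum : effSum (effC c :: q.reverse) = effTerm (effC c) (effC c :: q) + effSum q.reverse := by
    show effTerm (effC c) (effC c :: q.reverse) + effSum q.reverse = _
    rw [effTerm_congr (effC c) (effC c :: q.reverse) (effC c :: q) (by simp)
        (fun j => by simp [List.count_cons, List.count_reverse])]
  rw [hsum]
  push_cast
  ring

-- ===== loop invariants (filled in below) =====
theorem loopA (cs : List Char) (q : List ℕ) (hcs : ∀ c ∈ cs, InR c) (hq : ∀ x ∈ q, x < 26) :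
    cs.foldl pvStepA (cntL q, (q.length : Int), ((effSum q.reverse : ℕ) : Int), ((effComb q : ℕ) : Int)) =
      (cntL (q ++ cs.map effC), ((q.length + cs.length : ℕ) : Int),
        ((effSum (q ++ cs.map effC).reverse : ℕ) : Int), ((effComb (q ++ cs.map effC) : ℕ) : Int)) := by
  induction cs generalizing q with
  | nil => simp
  | cons c t ih =>
    have hc : InR c := hcs c (by simp)
    have he : effC c < 26 := effC_lt c hc
    have ht : ∀ c' ∈ t, InR c' := fun c' h' => hcs c' (by simp [h'])
    have hq' : ∀ x ∈ q ++ [effC c], x < 26 := by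
      intro x hx
      rcases List.mem_append.mp hx with h | h
      · exact hq x h
      · simp at h; omega
    have hcount : ∀ j, (q ++ [effC c]).count j = (effC c :: q).count j := by
      intro j; simp [List.count_append, List.count_cons]
    have hstep : pvStepA (cntL q, (q.length : Int), ((effSum q.reverse : ℕ) : Int), ((effComb q : ℕ) : Int)) c
        = (cntL (q ++ [effC c]), ((q ++ [effC c]).length : Int),
           ((effSum (q ++ [effC c]).reverse : ℕ) : Int), ((effComb (q ++ [effC c]) : ℕ) : Int)) := by
      rw [stepA_eval c hc q hq, cntL_append_singleton,
          effComb_congr (q ++ [effC c]) (effC c :: q) (by simp) hcount]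
      have hrev : (q ++ [effC c]).reverse = effC c :: q.reverse := by simp
      rw [hrev]
      simp
    rw [List.foldl_cons, hstep, ih (q ++ [effC c]) ht hq']
    simp only [List.append_assoc, List.singleton_append, List.map_cons, List.length_append,
      List.length_cons, List.length_map, List.length_singleton, List.map_cons]
    norm_num
    omega

theorem loopC (cs : List Char) (q : List ℕ) (hcs : ∀ c ∈ cs, InR c) (hq : ∀ x ∈ q, x < 26) :
    cs.foldl pvCountStep (cntL q) = cntL (q ++ cs.map effC) := by
  induction cs generalizing q with
  | nil => simp
  | cons c t ih =>
    have hc : InR c := hcs c (by simp)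
    have he : effC c < 26 := effC_lt c hc
    have hstep : pvCountStep (cntL q) c = cntL (effC c :: q) := by
      unfold pvCountStep
      simp only
      rw [pyGetD_idx _ (length_cntL q) c hc, getElem_cntL q _ he,
          pySetD_idx _ (length_cntL q) c hc, set_inc_cntL q _ he]
    have ht : ∀ c' ∈ t, InR c' := fun c' h' => hcs c' (by simp [h'])
    have hq' : ∀ x ∈ (effC c :: q), x < 26 := by
      intro x hx
      rcases List.mem_cons.mp hx with h | h
      · omega
      · exact hq x h
    simp only [List.foldl_cons, hstep, ih (effC c :: q) ht hq', List.map_cons]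
    rw [cntL_middle]
    rfl

def factL (n : ℕ) : List Int := (List.range (n+1)).map (fun i => ((i.factorial : ℕ) : Int))

-- partial factorial table: entries up to k already filled in
def fkL (n k : ℕ) : List Int := (List.range (n+1)).map (fun i => if i ≤ k then ((i.factorial : ℕ) : Int) else 1)

theorem stepF (n m : ℕ) (hm : m < n) : pvFactStep (fkL n m) ((m : Int) + 1) = fkL n (m+1) := by
  unfold pvFactStep
  have h1 : ((m : Int) + 1) - 1 = ((m : ℕ) : Int) := by ring
  have h2 : ((m : Int) + 1) = ((m + 1 : ℕ) : Int) := by push_cast; ring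
  rw [h1, h2, PySem.List.pyGetD_natCast, PySem.List.pySetD_natCast]
  have h3 : (fkL n m).getD m 0 = ((m.factorial : ℕ) : Int) := by
    unfold fkL
    rw [List.getD_eq_getElem _ _ (by simp; omega)]
    simp
  rw [h3]
  unfold fkL
  apply List.ext_getElem
  · simp
  · intro i hi1 hi2
    have hi : i < n + 1 := by simpa using hi2
    by_cases hie : i = m + 1
    · subst hie
      rw [List.getElem_set_self (by simpa using hi)]
      simp only [List.getElem_map, List.getElem_range]
      rw [if_pos (le_refl _)]
      push_cast [Nat.factorial_succ]
      ring
    · rw [List.getElem_set_ne (fun h => hie h.symm)]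
      simp only [List.getElem_map, List.getElem_range]
      by_cases him : i ≤ m
      · rw [if_pos him, if_pos (by omega)]
      · rw [if_neg him, if_neg (by omega)]

theorem loopF (n : ℕ) :
    (PySem.List.pyRange 1 ((n:Int)+1) 1).foldl pvFactStep (List.replicate (n+1) (1:Int)) = factL n := by
  have hinit : List.replicate (n+1) (1:Int) = fkL n 0 := by
    unfold fkL
    apply List.ext_getElem
    · simp
    · intro i h1 h2
      have hi : i < n + 1 := by simpa using h1
      simp only [List.getElem_replicate, List.getElem_map, List.getElem_range]
      by_cases h0 : i = 0
      · subst h0; simp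
      · rw [if_neg (by omega)]
  have main : ∀ m, m ≤ n → (PySem.List.pyRange 1 ((m:Int)+1) 1).foldl pvFactStep (fkL n 0) = fkL n m := by
    intro m
    induction m with
    | zero =>
      intro
      simp [PySem.List.pyRange_one]
    | succ k ih =>
      intro hk
      have hsplit : PySem.List.pyRange 1 (((k+1:ℕ):Int)+1) 1 = PySem.List.pyRange 1 (((k:ℕ):Int)+1) 1 ++ [((k:Int)+1)] := by
        have hcast : (((k+1:ℕ)):Int) + 1 = (((k:ℕ):Int)+1) + 1 := by push_cast; ring
        rw [hcast, PySem.List.pyRange_one_succ_right (by omega)]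
      rw [hsplit, List.foldl_append, ih (by omega)]
      simp only [List.foldl_cons, List.foldl_nil]
      exact stepF n k (by omega)
  rw [hinit, main n (le_refl n)]
  unfold fkL factL
  apply List.map_congr_left
  intro i hi
  rw [if_pos (by simp at hi; omega)]

theorem foldl_mul (g : Int → Int) (xs : List Int) (a : Int) :
    xs.foldl (fun d k => d * g k) a = a * (xs.map g).prod := by
  induction xs generalizing a with
  | nil => simp
  | cons x t ih => simp [ih, mul_assoc]

theorem prod_range_cast (f : ℕ → ℕ) (m : ℕ) :
    ((List.range m).map (fun j => ((f j : ℕ) : Int))).prod = ((∏ j ∈ Finset.range m, f j : ℕ) : Int) := by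
  induction m with
  | zero => simp
  | succ k ih =>
    rw [List.range_succ, List.map_append, List.prod_append, ih, Finset.prod_range_succ]
    push_cast
    simp

theorem pyGetD_factL (n k : ℕ) (hk : k ≤ n) :
    PySem.List.pyGetD (factL n) ((k : ℕ) : Int) 0 = ((k.factorial : ℕ) : Int) := by
  rw [PySem.List.pyGetD_natCast]
  unfold factL
  rw [List.getD_eq_getElem _ _ (by simp; omega)]
  simp

theorem denomEq (l : List ℕ) (n : ℕ) (hle : ∀ j, l.count j ≤ n) :
    (cntL l).foldl (fun d k => d * PySem.List.pyGetD (factL n) k 0) 1 = ((effDfac l : ℕ) : Int) := by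
  rw [foldl_mul, one_mul]
  unfold cntL effDfac
  rw [List.map_map]
  have : ((fun k => PySem.List.pyGetD (factL n) k 0) ∘ fun j => ((l.count j : ℕ) : Int))
      = fun j => (((l.count j).factorial : ℕ) : Int) := by
    funext j
    simp only [Function.comp_apply]
    exact pyGetD_factL n (l.count j) (hle j)
  rw [this, prod_range_cast]

theorem loopB (cs : List Char) (n : ℕ) (acc : Int) (hcs : ∀ c ∈ cs, InR c) (hn : cs.length ≤ n) :
    cs.foldl (pvStepB (factL n)) (cntL (cs.map effC), ((effDfac (cs.map effC) : ℕ) : Int), acc, (cs.length : Int)) =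
      (cntL [], ((effDfac ([] : List ℕ) : ℕ) : Int), acc + ((effSum (cs.map effC) : ℕ) : Int), 0) := by
  induction cs generalizing acc with
  | nil => simp [effSum]
  | cons c t ih =>
    have hc : InR c := hcs c (by simp)
    have he : effC c < 26 := effC_lt c hc
    have ht : ∀ c' ∈ t, InR c' := fun c' h' => hcs c' (by simp [h'])
    have hnt : t.length ≤ n := by simp at hn; omega
    set e := effC c with hedef
    set u := t.map effC with hudef
    have hcounts : ∀ j, (e :: u).count j ≤ n := by
      intro j
      have h1 := List.count_le_length (l := e :: u) (a := j)
      have h2 : (e :: u).length = t.length + 1 := by simp [hudef]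
      simp at hn
      omega
    have hterm : PySem.Int.floordiv
        (((PySem.List.slice (cntL (e :: u)) none (some ((c.toNat : Int) - 97))).sum) *
          PySem.List.pyGetD (factL n) (((t.length + 1 : ℕ) : Int) - 1) 0)
        ((effDfac (e :: u) : ℕ) : Int)
        = ((effTerm e (e :: u) : ℕ) : Int) := by
      rw [slice_idx _ (length_cntL _) c hc, ← hedef, sum_take_cntL _ _ (le_of_lt he)]
      have hm1 : ((t.length + 1 : ℕ) : Int) - 1 = ((t.length : ℕ) : Int) := by push_cast; ring
      rw [hm1, pyGetD_factL n t.length (by omega)]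
      have hmul : ((effLess e (e :: u) : ℕ) : Int) * ((t.length.factorial : ℕ) : Int)
          = ((effLess e (e :: u) * t.length.factorial : ℕ) : Int) := by push_cast; ring
      rw [hmul, PySem.Int.floordiv_natCast]
      congr 1
      unfold effTerm
      congr 2
      simp [hudef]
    have hdenom : PySem.Int.floordiv ((effDfac (e :: u) : ℕ) : Int)
        (((e :: u).count e : ℕ) : Int) = ((effDfac u : ℕ) : Int) := by
      rw [PySem.Int.floordiv_natCast]
      have hnat : effDfac (e :: u) / (e :: u).count e = effDfac u := by
        rw [Dfac_cons e u he]
        have hcc : (e :: u).count e = u.count e + 1 := by simp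
        rw [hcc, Nat.mul_div_cancel_left _ (Nat.succ_pos _)]
      exact congrArg _ hnat
    have hdec : PySem.List.pySetD (cntL (e :: u)) ((c.toNat : Int) - 97)
        (PySem.List.pyGetD (cntL (e :: u)) ((c.toNat : Int) - 97) 0 - 1) = cntL u := by
      rw [pyGetD_idx _ (length_cntL _) c hc, getElem_cntL _ _ he,
          pySetD_idx _ (length_cntL _) c hc]
      have hcast : ((List.count e (e :: u) : ℕ) : Int) - 1 = ((u.count e : ℕ) : Int) := by
        simp [List.count_cons]
      rw [hcast]
      exact set_dec_cntL u e he
    have hgetcnt : PySem.List.pyGetD (cntL (e :: u)) ((c.toNat : Int) - 97) 0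
        = (((e :: u).count e : ℕ) : Int) := by
      rw [pyGetD_idx _ (length_cntL _) c hc, getElem_cntL _ _ he]
    have hstep : pvStepB (factL n) (cntL ((c :: t).map effC), ((effDfac ((c :: t).map effC) : ℕ) : Int), acc, ((c :: t).length : Int)) c
        = (cntL u, ((effDfac u : ℕ) : Int), acc + ((effTerm e (e :: u) : ℕ) : Int), ((t.length : ℕ) : Int)) := by
      simp only [List.map_cons, ← hedef, ← hudef, List.length_cons]
      unfold pvStepB
      simp only
      rw [hterm, hdec, hgetcnt, hdenom]
      have hm : ((t.length + 1 : ℕ) : Int) - 1 = ((t.length : ℕ) : Int) := by push_cast; ring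
      rw [hm]
    rw [List.foldl_cons, hstep, ih (acc + ((effTerm e (e :: u) : ℕ) : Int)) ht hnt]
    simp only [List.map_cons, ← hedef, ← hudef, Prod.mk.injEq]
    refine ⟨trivial, trivial, ?_, trivial⟩
    show acc + ((effTerm e (e :: u) : ℕ) : Int) + ((effSum u : ℕ) : Int)
        = acc + ((effSum (e :: u) : ℕ) : Int)
    have : effSum (e :: u) = effTerm e (e :: u) + effSum u := rfl
    rw [this]
    push_cast
    ring

-- ===== VERDICT (by name: the statement is the Claim_ definition above) =====
theorem makeStringSorted1_spec : Claim_equal_makeStringSorted1 := by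
  unfold Claim_equal_makeStringSorted1
  intro s _ hpre
  unfold Spec_makeStringSorted1 makeStringSorted1 makeStringSorted1_alt
  simp only
  have hin : ∀ c ∈ s.toList, InR c := by
    intro c hc
    have := List.all_eq_true.mp hpre c hc
    simp at this
    exact ⟨this.1, this.2⟩
  have hrev : ∀ c ∈ s.toList.reverse, InR c := fun c hc => hin c (List.mem_reverse.mp hc)
  have hnilq : ∀ x ∈ ([] : List ℕ), x < 26 := by simp
  -- the A side
  have hinit : (List.replicate 26 (0:Int), (0:Int), (0:Int), (1:Int))
      = (cntL ([] : List ℕ), ((List.length ([] : List ℕ) : ℕ) : Int),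
         ((effSum ([] : List ℕ).reverse : ℕ) : Int), ((effComb ([] : List ℕ) : ℕ) : Int)) := by
    rw [cntL_nil]
    simp [effSum, effComb, effDfac]
  rw [hinit, loopA s.toList.reverse [] hrev hnilq]
  -- the B side
  have hinitB : List.replicate 26 (0:Int) = cntL ([] : List ℕ) := cntL_nil.symm
  rw [hinitB, loopC s.toList [] hin hnilq, loopF s.toList.length]
  have hstart : cntL ([] ++ s.toList.map effC) = cntL (s.toList.map effC) := by rw [List.nil_append]
  rw [hstart, denomEq (s.toList.map effC) s.toList.length
        (fun j => le_trans (List.count_le_length) (by simp)),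
      loopB s.toList s.toList.length 0 hin (le_refl _)]
  simp only [List.nil_append, List.map_reverse, List.reverse_reverse, zero_add]
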